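-- pv_equiv track=rewrite | github.com/bradleytechman/jailbreaksappstatus | cogs/app.py | find_app
-- ===== SOURCE A (Python) =====
-- from typing import Any, Dict, List, Optional
--
-- def find_app(apps: List[Dict[str, Any]], query: str) -> Optional[Dict[str, Any]]:
--     q = (query or "").strip().lower()
--     qn = q.replace(" ", "")
--
--     for a in apps:
--         name = str(a.get("name", "")).strip()
--         if name and name.lower().replace(" ", "") == qn:
--             return a
--
--     for a in apps:
--         name = str(a.get("name", "")).strip()
--         if name and q in name.lower():
--             return a
--
--     return None
-- ===== SOURCE B (Python) =====
-- from typing import Any, Dict, List, Optional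
--
-- def find_app(apps: List[Dict[str, Any]], query: str) -> Optional[Dict[str, Any]]:
--     q = (query or "").strip().lower()
--     qn = q.replace(" ", "")
--     scored = []  # (score, index, app): 0 = exact normalized match, 1 = substring match
--     for i, a in enumerate(apps):
--         name = str(a.get("name", "")).strip()
--         if not name:
--             continue
--         low = name.lower()
--         if low.replace(" ", "") == qn:
--             scored.append((0, i, a))
--         elif q in low:
--             scored.append((1, i, a))
--     if not scored:
--         return None
--     return min(scored, key=lambda t: (t[0], t[1]))[2]
-- ===== Notes on version B (the rewrite author's own statement) =====
-- stated objective: alternative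
-- what changed: Instead of A's two sequential scans (exact pass, then substring pass), B builds in one pass a list of scored candidates (score 0 for an exact normalized match, 1 for a substring match, tagged with the index) and returns the candidate minimal under the lexicographic (score, index) key.
import Mathlib
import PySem

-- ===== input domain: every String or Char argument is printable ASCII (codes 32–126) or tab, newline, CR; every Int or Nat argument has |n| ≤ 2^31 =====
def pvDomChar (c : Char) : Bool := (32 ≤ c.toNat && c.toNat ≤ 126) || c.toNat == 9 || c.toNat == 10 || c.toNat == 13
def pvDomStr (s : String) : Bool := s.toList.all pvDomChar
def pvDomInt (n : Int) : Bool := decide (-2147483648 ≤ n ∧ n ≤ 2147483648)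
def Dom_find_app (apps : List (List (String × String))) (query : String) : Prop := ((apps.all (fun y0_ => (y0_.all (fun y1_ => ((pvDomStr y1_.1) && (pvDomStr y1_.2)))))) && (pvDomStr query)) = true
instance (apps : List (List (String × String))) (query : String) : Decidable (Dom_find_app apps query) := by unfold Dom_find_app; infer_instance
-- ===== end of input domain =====

-- B replaces A's two sequential scans by one pass that collects (score, index, app)
-- candidates (0 = exact normalized match, 1 = substring match) and returns the candidate
-- minimal under the lexicographic (score, index) key (objective: alternative, same cost).

-- ===== PORT A =====
-- name = str(a.get("name", "")).strip()   (values are strings, so str() is the identity)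
def pvName (a : List (String × String)) : String :=
  PySem.Str.strip ((a.lookup "name").getD "")

-- name.lower().replace(" ", "")
def pvNorm (s : String) : String :=
  PySem.Str.replace (PySem.Str.lower s) " " ""

-- first loop of A: exact normalized match
def find_app_loop1 (qn : String) : List (List (String × String)) → Option (List (String × String))
  | [] => none
  | a :: rest =>
      let name := pvName a
      if name != "" && pvNorm name == qn then some a else find_app_loop1 qn rest

-- second loop of A: substring match
def find_app_loop2 (q : String) : List (List (String × String)) → Option (List (String × String))
  | [] => none
  | a :: rest =>
      let name := pvName a
      if name != "" && PySem.Str.isIn q (PySem.Str.lower name) then some a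
      else find_app_loop2 q rest

def find_app (apps : List (List (String × String))) (query : String) : Option (List (String × String)) :=
  let q := PySem.Str.lower (PySem.Str.strip query)
  let qn := PySem.Str.replace q " " ""
  match find_app_loop1 qn apps with
  | some a => some a
  | none => find_app_loop2 q apps

-- ===== PORT B =====
-- enumerate(apps) starting at k
def pvEnumFrom (k : Nat) : List (List (String × String)) → List (Nat × List (String × String))
  | [] => []
  | a :: rest => (k, a) :: pvEnumFrom (k + 1) rest

-- one iteration of B's loop body: score an (index, app) pair, or skip it
def pvScore (q qn : String) (ia : Nat × List (String × String)) :
    Option (Nat × Nat × List (String × String)) :=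
  if pvName ia.2 == "" then none
  else if pvNorm (pvName ia.2) == qn then some (0, ia.1, ia.2)
  else if PySem.Str.isIn q (PySem.Str.lower (pvName ia.2)) then some (1, ia.1, ia.2)
  else none

-- Python tuple comparison on the (score, index) key: keep the first minimum
def pvPickMin (b t : Nat × Nat × List (String × String)) : Nat × Nat × List (String × String) :=
  if t.1 < b.1 || (t.1 == b.1 && t.2.1 < b.2.1) then t else b

def find_app_alt (apps : List (List (String × String))) (query : String) : Option (List (String × String)) :=
  let q := PySem.Str.lower (PySem.Str.strip query)
  let qn := PySem.Str.replace q " " ""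
  match (pvEnumFrom 0 apps).filterMap (pvScore q qn) with
  | [] => none
  | x :: xs => some ((xs.foldl pvPickMin x).2.2)

-- ===== PRECONDITION & SPEC =====
def Spec_find_app (apps : List (List (String × String))) (query : String) (out : Option (List (String × String))) : Prop := out = find_app_alt apps query
instance (apps : List (List (String × String))) (query : String) (out : Option (List (String × String))) : Decidable (Spec_find_app apps query out) := by unfold Spec_find_app; infer_instance

-- ===== CLAIM =====
def Claim_equal_find_app : Prop := ∀ (apps : List (List (String × String))) (query : String), Dom_find_app apps query → Spec_find_app apps query (find_app apps query)

-- ===== LEMMAS AND PROOFS =====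
-- every index in the scored list is ≥ the enumeration start
lemma pvScored_idx_lb (q qn : String) (l : List (List (String × String))) (k : Nat) :
    ∀ t ∈ (pvEnumFrom k l).filterMap (pvScore q qn), k ≤ t.2.1 := by
  induction l generalizing k with
  | nil => intro t ht; simp [pvEnumFrom] at ht
  | cons a rest ih =>
      intro t ht
      simp only [pvEnumFrom, List.filterMap_cons] at ht
      rcases h : pvScore q qn (k, a) with _ | y
      · rw [h] at ht
        exact Nat.le_of_succ_le (ih (k + 1) t ht)
      · rw [h] at ht
        rcases List.mem_cons.mp ht with rfl | ht'
        · unfold pvScore at h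
          split_ifs at h <;> (try cases h) <;> simp
        · exact Nat.le_of_succ_le (ih (k + 1) t ht')

-- every score in the scored list is 0 or 1
lemma pvScored_score01 (q qn : String) (l : List (List (String × String))) (k : Nat) :
    ∀ t ∈ (pvEnumFrom k l).filterMap (pvScore q qn), t.1 = 0 ∨ t.1 = 1 := by
  induction l generalizing k with
  | nil => intro t ht; simp [pvEnumFrom] at ht
  | cons a rest ih =>
      intro t ht
      simp only [pvEnumFrom, List.filterMap_cons] at ht
      rcases h : pvScore q qn (k, a) with _ | y
      · rw [h] at ht; exact ih (k + 1) t ht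
      · rw [h] at ht
        rcases List.mem_cons.mp ht with rfl | ht'
        · unfold pvScore at h
          split_ifs at h <;> (try cases h) <;> simp
        · exact ih (k + 1) t ht'

-- indices in the scored list are strictly increasing
lemma pvScored_pairwise (q qn : String) (l : List (List (String × String))) (k : Nat) :
    ((pvEnumFrom k l).filterMap (pvScore q qn)).Pairwise (fun s t => s.2.1 < t.2.1) := by
  induction l generalizing k with
  | nil => simp [pvEnumFrom]
  | cons a rest ih =>
      simp only [pvEnumFrom, List.filterMap_cons]
      rcases h : pvScore q qn (k, a) with _ | y
      · exact ih (k + 1)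
      · refine List.Pairwise.cons ?_ (ih (k + 1))
        intro t ht
        have hk : k + 1 ≤ t.2.1 := pvScored_idx_lb q qn rest (k + 1) t ht
        have hy : y.2.1 = k := by
          unfold pvScore at h; split_ifs at h <;> (try cases h) <;> simp
        omega

-- the fold picks the first score-0 element if any, else the head (= accumulator)
lemma pvFoldMin_spec (x : Nat × Nat × List (String × String))
    (L : List (Nat × Nat × List (String × String)))
    (hx : x.1 = 0 ∨ x.1 = 1)
    (hall : ∀ t ∈ L, t.1 = 0 ∨ t.1 = 1)
    (hxL : ∀ t ∈ L, x.2.1 < t.2.1)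
    (hP : L.Pairwise (fun s t => s.2.1 < t.2.1)) :
    L.foldl pvPickMin x =
      if x.1 = 0 then x
      else match L.find? (fun t => t.1 == 0) with
           | some z => z
           | none => x := by
  induction L generalizing x with
  | nil => cases hx <;> simp_all
  | cons y L ih =>
      have hyx : x.2.1 < y.2.1 := hxL y (List.mem_cons_self)
      have hyL : ∀ t ∈ L, y.2.1 < t.2.1 := (List.pairwise_cons.mp hP).1
      have hP' : L.Pairwise (fun s t => s.2.1 < t.2.1) := (List.pairwise_cons.mp hP).2
      have hxL' : ∀ t ∈ L, x.2.1 < t.2.1 := fun t ht => hxL t (List.mem_cons_of_mem _ ht)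
      have hall' : ∀ t ∈ L, t.1 = 0 ∨ t.1 = 1 := fun t ht => hall t (List.mem_cons_of_mem _ ht)
      simp only [List.foldl_cons]
      rcases hx with hx0 | hx1
      · -- accumulator already exact: it wins against every later element
        have hpick : pvPickMin x y = x := by
          unfold pvPickMin
          have : ¬ (y.1 < x.1 || (y.1 == x.1 && y.2.1 < x.2.1)) = true := by
            simp [hx0]; omega
          simp [this]
        rw [hpick, ih x (Or.inl hx0) hall' hxL' hP']
        simp [hx0]
      · by_cases hy0 : y.1 = 0
        · -- new element is exact, accumulator is not: element wins
          have hpick : pvPickMin x y = y := by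
            unfold pvPickMin; simp [hx1, hy0]
          rw [hpick, ih y (Or.inl hy0) hall' hyL hP']
          simp [hx1, hy0]
        · -- neither exact: accumulator (earlier index) wins
          have hy1 : y.1 = 1 := (hall y List.mem_cons_self).resolve_left hy0
          have hpick : pvPickMin x y = x := by
            unfold pvPickMin
            have : ¬ (y.1 < x.1 || (y.1 == x.1 && y.2.1 < x.2.1)) = true := by
              simp [hx1, hy1]; omega
            simp [this]
          rw [hpick, ih x (Or.inr hx1) hall' hxL' hP']
          simp [hx1, hy0]

-- the first score-0 candidate is exactly A's first loop's answer
lemma pvFind0_eq_loop1 (q qn : String) (l : List (List (String × String))) (k : Nat) :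
    (((pvEnumFrom k l).filterMap (pvScore q qn)).find? (fun t => t.1 == 0)).map (fun t => t.2.2)
      = find_app_loop1 qn l := by
  induction l generalizing k with
  | nil => simp [pvEnumFrom, find_app_loop1]
  | cons a rest ih =>
      simp only [pvEnumFrom, List.filterMap_cons, find_app_loop1]
      by_cases h1 : pvName a = ""
      · rw [show pvScore q qn (k, a) = none by simp [pvScore, h1]]
        simpa [h1] using ih (k + 1)
      · by_cases h2 : pvNorm (pvName a) = qn
        · rw [show pvScore q qn (k, a) = some (0, k, a) by simp [pvScore, h1, h2]]
          simp [h1, h2]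
        · by_cases h3 : PySem.Chars.isIn q.toList (PySem.Chars.lower (pvName a).toList) = true
          · rw [show pvScore q qn (k, a) = some (1, k, a) by simp [pvScore, h1, h2, h3]]
            simp only [List.find?_cons]
            simpa [h1, h2] using ih (k + 1)
          · rw [show pvScore q qn (k, a) = none by simp [pvScore, h1, h2, h3]]
            simpa [h1, h2] using ih (k + 1)

-- when A's first loop fails, the head of the scored list is A's second loop's answer
lemma pvHead_eq_loop2 (q qn : String) (l : List (List (String × String))) (k : Nat)
    (h : find_app_loop1 qn l = none) :
    (((pvEnumFrom k l).filterMap (pvScore q qn)).head?).map (fun t => t.2.2)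
      = find_app_loop2 q l := by
  induction l generalizing k with
  | nil => simp [pvEnumFrom, find_app_loop2]
  | cons a rest ih =>
      simp only [find_app_loop1] at h
      simp only [pvEnumFrom, List.filterMap_cons, find_app_loop2]
      by_cases h1 : pvName a = ""
      · have h' : find_app_loop1 qn rest = none := by simpa [h1] using h
        rw [show pvScore q qn (k, a) = none by simp [pvScore, h1]]
        simpa [h1] using ih (k + 1) h'
      · by_cases h2 : pvNorm (pvName a) = qn
        · simp [h1, h2] at h
        · by_cases h3 : PySem.Chars.isIn q.toList (PySem.Chars.lower (pvName a).toList) = true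
          · rw [show pvScore q qn (k, a) = some (1, k, a) by simp [pvScore, h1, h2, h3]]
            simp [h1, h3]
          · have h' : find_app_loop1 qn rest = none := by simpa [h1, h2] using h
            rw [show pvScore q qn (k, a) = none by simp [pvScore, h1, h2, h3]]
            simpa [h1, h3] using ih (k + 1) h'

-- ===== VERDICT =====
theorem find_app_spec : Claim_equal_find_app := by
  intro apps query _
  unfold Spec_find_app find_app find_app_alt
  simp only
  set q := PySem.Str.lower (PySem.Str.strip query) with hq
  set qn := PySem.Str.replace q " " "" with hqn
  rcases hL : (pvEnumFrom 0 apps).filterMap (pvScore q qn) with _ | ⟨x, xs⟩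
  · -- nothing scored: both loops fail
    have h1 : find_app_loop1 qn apps = none := by
      rw [← pvFind0_eq_loop1 q qn apps 0, hL]; simp
    have h2 : find_app_loop2 q apps = none := by
      rw [← pvHead_eq_loop2 q qn apps 0 h1, hL]; simp
    simp [h1, h2]
  · show (match find_app_loop1 qn apps with
          | some a => some a
          | none => find_app_loop2 q apps) = some ((xs.foldl pvPickMin x).2.2)
    have h01 := pvScored_score01 q qn apps 0
    have hP := pvScored_pairwise q qn apps 0
    rw [hL] at h01 hP
    have hx01 : x.1 = 0 ∨ x.1 = 1 := h01 x (List.mem_cons_self)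
    have hfold := pvFoldMin_spec x xs hx01 (fun t ht => h01 t (List.mem_cons_of_mem _ ht)) (List.pairwise_cons.mp hP).1 (List.pairwise_cons.mp hP).2
    have hfind := pvFind0_eq_loop1 q qn apps 0
    rw [hL] at hfind
    rw [hfold]
    rcases hx01 with hx0 | hx1
    · -- head is exact: loop1 finds it
      rw [if_pos hx0]
      simp [hx0] at hfind
      rw [← hfind]
    · rw [if_neg (by simp [hx1])]
      simp [hx1] at hfind
      rcases hz : xs.find? (fun t => t.1 == 0) with _ | z
      · -- no exact anywhere: loop1 = none, head = loop2's answer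
        rw [hz] at hfind; simp at hfind
        have h2 := pvHead_eq_loop2 q qn apps 0 hfind.symm
        rw [hL] at h2; simp at h2
        simp [← hfind, hz, ← h2]
      · -- first exact is inside the tail: loop1 returns it
        rw [hz] at hfind; simp at hfind
        simp [← hfind, hz]
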